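-- pv_equiv track=rewrite | github.com/sfadfe/projectile-motion | fff.py | draw_braille
-- ===== SOURCE A (Python) =====
-- DOT_MAP = {
--     (0,0): 1, (0,1): 2, (0,2): 3, (0,3): 7,
--     (1,0): 4, (1,1): 5, (1,2): 6, (1,3): 8,
-- }
--
-- def draw_braille(grid, width_cells, height_cells):
--     Wpx = width_cells * 2
--     Hpx = height_cells * 4
--     lines = []
--     for cy in range(height_cells):
--         row = []
--         for cx in range(width_cells):
--             bits = 0
--             for dy in range(4):
--                 for dx in range(2):
--                     gy = cy*4 + dy
--                     gx = cx*2 + dx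
--                     if grid[gy][gx]:
--                         bits |= 1 << (DOT_MAP[(dx, dy)] - 1)
--             row.append(chr(0x2800 + bits) if bits else ' ')
--         lines.append(''.join(row))
--     return '\n'.join(lines)
-- ===== SOURCE B (Python) =====
-- DOT_MAP = {
--     (0,0): 1, (0,1): 2, (0,2): 3, (0,3): 7,
--     (1,0): 4, (1,1): 5, (1,2): 6, (1,3): 8,
-- }
--
-- def draw_braille(grid, width_cells, height_cells):
--     # pixel-major: one flat pass over the pixel window accumulating bits per cell,
--     # then a single formatting pass
--     acc = [[0] * width_cells for _ in range(height_cells)]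
--     for gy in range(height_cells * 4):
--         row = acc[gy // 4]
--         ry = gy % 4
--         for gx in range(width_cells * 2):
--             if grid[gy][gx]:
--                 row[gx // 2] |= 1 << (DOT_MAP[(gx % 2, ry)] - 1)
--     return '\n'.join(''.join(chr(0x2800 + b) if b else ' ' for b in r) for r in acc)
-- ===== Notes on version B (the rewrite author's own statement) =====
-- stated objective: alternative
-- what changed: Replaces A's cell-major nest (for each output cell, re-derive and probe its 8 pixel coordinates, one DOT_MAP lookup per probe) by a pixel-major single sweep that ORs each set pixel's braille bit into a preallocated bits matrix, followed by a separate formatting pass over that matrix.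
import Mathlib
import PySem

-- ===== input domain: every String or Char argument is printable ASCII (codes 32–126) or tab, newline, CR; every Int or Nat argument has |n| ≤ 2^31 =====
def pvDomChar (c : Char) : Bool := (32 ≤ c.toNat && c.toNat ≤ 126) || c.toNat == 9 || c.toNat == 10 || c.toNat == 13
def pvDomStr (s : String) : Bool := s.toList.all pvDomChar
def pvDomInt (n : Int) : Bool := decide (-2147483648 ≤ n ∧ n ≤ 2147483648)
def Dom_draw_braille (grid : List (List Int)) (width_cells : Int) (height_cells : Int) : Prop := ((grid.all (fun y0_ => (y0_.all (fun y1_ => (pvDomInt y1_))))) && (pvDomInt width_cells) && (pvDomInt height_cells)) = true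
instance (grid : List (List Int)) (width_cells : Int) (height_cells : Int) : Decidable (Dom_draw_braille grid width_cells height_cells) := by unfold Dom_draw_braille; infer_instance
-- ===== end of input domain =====

-- B replaces A's cell-major nest (per output cell, re-probe its 8 pixels) by a pixel-major
-- accumulation pass into a bits matrix followed by one formatting pass (objective: alternative).

-- The module-level constant DOT_MAP, shared by both Python files (total on the 2×4 key set it is used on).
def DOT_MAP (dx dy : Int) : Nat :=
  if dx = 0 then (if dy = 0 then 1 else if dy = 1 then 2 else if dy = 2 then 3 else 7)
  else (if dy = 0 then 4 else if dy = 1 then 5 else if dy = 2 then 6 else 8)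

-- ===== PORT A =====
-- literal port of Source A (Wpx/Hpx are computed but never used in A and are omitted);
-- grid[gy][gx] is pyGetD with a junk default: Python raises IndexError exactly outside Pre_.
def draw_braille (grid : List (List Int)) (width_cells : Int) (height_cells : Int) : String :=
  let lines : List (List Char) :=
    (PySem.List.pyRange 0 height_cells 1).foldl (fun lines cy =>
      let row : List Char :=
        (PySem.List.pyRange 0 width_cells 1).foldl (fun row cx =>
          let bits : Int :=
            (PySem.List.pyRange 0 4 1).foldl (fun bits dy =>
              (PySem.List.pyRange 0 2 1).foldl (fun bits dx =>
                let gy := cy * 4 + dy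
                let gx := cx * 2 + dx
                if PySem.List.pyGetD (PySem.List.pyGetD grid gy []) gx 0 ≠ 0 then
                  PySem.Int.bor bits ((1 : Int) <<< (DOT_MAP dx dy - 1))
                else bits) bits) 0
          row ++ [if bits ≠ 0 then Char.ofNat (0x2800 + bits).toNat else ' ']) []
      lines ++ [row]) []
  String.ofList (PySem.Chars.join ['\n'] lines)

-- ===== PORT B =====
-- literal port of Source B; 'row = acc[gy//4]' plus in-place '|=' on its entries is List.modify
-- on that row of acc (return value only; Source B mutates no argument).
def draw_braille_alt (grid : List (List Int)) (width_cells : Int) (height_cells : Int) : String :=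
  let acc : List (List Int) :=
    (PySem.List.pyRange 0 height_cells 1).map (fun _ => PySem.List.pyRepeat [(0 : Int)] width_cells)
  let acc :=
    (PySem.List.pyRange 0 (height_cells * 4) 1).foldl (fun acc gy =>
      let ry := PySem.Int.mod gy 4
      acc.modify (PySem.Int.floordiv gy 4).toNat (fun row =>
        (PySem.List.pyRange 0 (width_cells * 2) 1).foldl (fun row gx =>
          if PySem.List.pyGetD (PySem.List.pyGetD grid gy []) gx 0 ≠ 0 then
            row.modify (PySem.Int.floordiv gx 2).toNat (fun b =>
              PySem.Int.bor b ((1 : Int) <<< (DOT_MAP (PySem.Int.mod gx 2) ry - 1)))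
          else row) row)) acc
  String.ofList (PySem.Chars.join ['\n']
    (acc.map (fun r => r.map (fun b => if b ≠ 0 then Char.ofNat (0x2800 + b).toNat else ' '))))

-- ===== PRECONDITION & SPEC =====
-- Pre_ excludes exactly the inputs on which the Python A raises IndexError: a positive cell
-- window whose pixel window is not covered by grid (both Pythons raise there).
def Pre_draw_braille (grid : List (List Int)) (width_cells : Int) (height_cells : Int) : Prop :=
  width_cells ≤ 0 ∨ height_cells ≤ 0 ∨
    ((height_cells * 4).toNat ≤ grid.length ∧
      ∀ row ∈ grid.take (height_cells * 4).toNat, (width_cells * 2).toNat ≤ row.length)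
instance (grid : List (List Int)) (width_cells : Int) (height_cells : Int) : Decidable (Pre_draw_braille grid width_cells height_cells) := by unfold Pre_draw_braille; infer_instance

def pvWitness_draw_braille : List (List Int) × Int × Int :=
  ([[1, 0], [0, 1], [1, 1], [0, 0]], 1, 1)

def Spec_draw_braille (grid : List (List Int)) (width_cells : Int) (height_cells : Int) (out : String) : Prop := out = draw_braille_alt grid width_cells height_cells
instance (grid : List (List Int)) (width_cells : Int) (height_cells : Int) (out : String) : Decidable (Spec_draw_braille grid width_cells height_cells out) := by unfold Spec_draw_braille; infer_instance

-- ===== CLAIM (what is proved, stated in full; the proofs are below) =====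
def Claim_equal_draw_braille : Prop := ∀ (grid : List (List Int)) (width_cells : Int) (height_cells : Int), Dom_draw_braille grid width_cells height_cells → Pre_draw_braille grid width_cells height_cells → Spec_draw_braille grid width_cells height_cells (draw_braille grid width_cells height_cells)

-- ===== LEMMAS AND PROOFS =====

lemma pyRange01 (n : Int) :
    PySem.List.pyRange 0 n 1 = (List.range n.toNat).map (fun (k : Nat) => (k : Int)) := by
  by_cases h : n ≤ 0
  · have h0 : n.toNat = 0 := by omega
    rw [h0]
    simp only [List.range_zero, List.map_nil]
    rw [List.eq_nil_iff_forall_not_mem]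
    intro x hx
    rw [PySem.List.mem_pyRange_one] at hx
    omega
  · have hn : n = (n.toNat : Int) := by omega
    rw [hn]
    exact PySem.List.pyRange_zero_natCast _

lemma modify_modify {α : Type} (l : List α) (i : Nat) (f g : α → α) :
    (l.modify i f).modify i g = l.modify i (fun x => g (f x)) := by
  apply List.ext_getElem?
  intro j
  simp only [List.getElem?_modify]
  cases l[j]? with
  | none => simp
  | some v => split <;> simp

lemma modify_id {α : Type} (l : List α) (i : Nat) : l.modify i (fun x => x) = l := by
  apply List.ext_getElem?
  intro j
  simp [List.getElem?_modify]

lemma foldl_modify_const {α β : Type} (l : List β) (i : Nat) (F : β → α → α) (a : List α) :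
    l.foldl (fun a x => a.modify i (F x)) a = a.modify i (fun r => l.foldl (fun r x => F x r) r) := by
  induction l generalizing a with
  | nil => simp only [List.foldl_nil]; rw [modify_id]
  | cons x t ih => simp only [List.foldl_cons]; rw [ih, modify_modify]

lemma range_mul_flatMap (n k : Nat) :
    List.range (n * k) = (List.range n).flatMap (fun i => (List.range k).map (fun d => k * i + d)) := by
  induction n with
  | zero => simp
  | succ m ih =>
    rw [List.range_succ, List.flatMap_append, ← ih, Nat.succ_mul, List.range_add]
    simp [Nat.mul_comm]

lemma foldl_modify_getElem {α : Type} (G : Nat → α → α) (n j : Nat) (a : List α) :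
    ((List.range n).foldl (fun a i => a.modify i (G i)) a)[j]? =
      if j < n then (a[j]?).map (G j) else a[j]? := by
  induction n generalizing a with
  | zero => simp
  | succ m ih =>
    rw [List.range_succ, List.foldl_append]
    simp only [List.foldl_cons, List.foldl_nil]
    rw [List.getElem?_modify, ih]
    rcases Nat.lt_trichotomy j m with h | h | h
    · simp only [if_pos h, if_pos (by omega : j < m + 1)]
      cases a[j]? <;> simp [show m ≠ j by omega]
    · subst h
      simp only [if_neg (by omega : ¬ j < j), if_pos (by omega : j < j + 1)]
      cases a[j]? <;> simp
    · simp only [if_neg (by omega : ¬ j < m), if_neg (by omega : ¬ j < m + 1)]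
      cases a[j]? <;> simp [show m ≠ j by omega]

lemma foldl_modify_range_replicate {α : Type} (G : Nat → α → α) (n : Nat) (r0 : α) :
    (List.range n).foldl (fun a i => a.modify i (G i)) (List.replicate n r0) =
      (List.range n).map (fun i => G i r0) := by
  apply List.ext_getElem?
  intro j
  rw [foldl_modify_getElem]
  by_cases h : j < n
  · simp [h]
  · rw [if_neg h]
    rw [List.getElem?_eq_none (by simpa using Nat.le_of_not_lt h),
        List.getElem?_eq_none (by simpa using Nat.le_of_not_lt h)]

def bitUpd (grid : List (List Int)) (gy gx : Nat) (b : Int) : Int :=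
  if PySem.List.pyGetD (PySem.List.pyGetD grid (gy : Int) []) (gx : Int) 0 ≠ 0 then
    PySem.Int.bor b ((1 : Int) <<< (DOT_MAP ((gx % 2 : Nat) : Int) ((gy % 4 : Nat) : Int) - 1))
  else b

def cellBits (grid : List (List Int)) (cy cx : Nat) : Int :=
  (List.range 4).foldl (fun b ry =>
    (List.range 2).foldl (fun b dx => bitUpd grid (4 * cy + ry) (2 * cx + dx) b) b) 0

lemma bitsA_eq (grid : List (List Int)) (cy cx : Nat) :
    (PySem.List.pyRange 0 4 1).foldl (fun bits dy =>
      (PySem.List.pyRange 0 2 1).foldl (fun bits dx =>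
        if PySem.List.pyGetD (PySem.List.pyGetD grid ((cy : Int) * 4 + dy) []) ((cx : Int) * 2 + dx) 0 ≠ 0 then
          PySem.Int.bor bits ((1 : Int) <<< (DOT_MAP dx dy - 1))
        else bits) bits) 0 = cellBits grid cy cx := by
  have e4 : PySem.List.pyRange 0 4 1 = [0, 1, 2, 3] := by decide
  have e2 : PySem.List.pyRange 0 2 1 = [0, 1] := by decide
  have r4 : List.range 4 = [0, 1, 2, 3] := by decide
  have r2 : List.range 2 = [0, 1] := by decide
  simp only [cellBits, bitUpd, e4, e2, r4, r2, List.foldl_cons, List.foldl_nil]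
  norm_num [Nat.mul_add_mod, Nat.add_mul_mod_self_left]
  ring_nf

def rend (b : Int) : Char := if b ≠ 0 then Char.ofNat (0x2800 + b).toNat else ' '

lemma A_form (grid : List (List Int)) (w h : Int) :
    draw_braille grid w h =
      String.ofList (PySem.Chars.join ['\n'] ((List.range h.toNat).map (fun cy =>
        (List.range w.toNat).map (fun cx => rend (cellBits grid cy cx))))) := by
  unfold draw_braille
  rw [pyRange01 h, pyRange01 w]
  rw [List.foldl_map, PySem.List.foldl_append_singleton_eq_map]
  simp only [List.nil_append]
  congr 1
  congr 1
  apply List.map_congr_left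
  intro cy _
  rw [List.foldl_map, PySem.List.foldl_append_singleton_eq_map]
  simp only [List.nil_append]
  apply List.map_congr_left
  intro cx _
  rw [bitsA_eq]
  rfl

lemma ite_modify {α : Type} (c : Prop) [Decidable c] (row : List α) (i : Nat) (f : α → α) :
    (if c then row.modify i f else row) = row.modify i (fun b => if c then f b else b) := by
  by_cases h : c <;> simp [h, modify_id]

def rowFun (grid : List (List Int)) (W gy : Nat) (row : List Int) : List Int :=
  (List.range (W * 2)).foldl (fun row gx => row.modify (gx / 2) (bitUpd grid gy gx)) row

def cellPair (grid : List (List Int)) (gy cx : Nat) (b : Int) : Int :=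
  bitUpd grid gy (2 * cx + 1) (bitUpd grid gy (2 * cx) b)

lemma div4_cast (gy : Nat) : (PySem.Int.floordiv (gy : Int) 4).toNat = gy / 4 := by
  rw [show ((4 : Int)) = ((4 : Nat) : Int) from by norm_num, PySem.Int.floordiv_natCast]
  exact Int.toNat_natCast _

lemma div2_cast (gx : Nat) : (PySem.Int.floordiv (gx : Int) 2).toNat = gx / 2 := by
  rw [show ((2 : Int)) = ((2 : Nat) : Int) from by norm_num, PySem.Int.floordiv_natCast]
  exact Int.toNat_natCast _

lemma mod4_cast (gy : Nat) : PySem.Int.mod (gy : Int) 4 = ((gy % 4 : Nat) : Int) := by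
  rw [show ((4 : Int)) = ((4 : Nat) : Int) from by norm_num, PySem.Int.mod_natCast]

lemma mod2_cast (gx : Nat) : PySem.Int.mod (gx : Int) 2 = ((gx % 2 : Nat) : Int) := by
  rw [show ((2 : Int)) = ((2 : Nat) : Int) from by norm_num, PySem.Int.mod_natCast]

lemma rowFun_eq (grid : List (List Int)) (W gy : Nat) (row : List Int) :
    rowFun grid W gy row =
      (List.range W).foldl (fun row cx => row.modify cx (cellPair grid gy cx)) row := by
  unfold rowFun
  rw [range_mul_flatMap W 2, List.foldl_flatMap]
  apply PySem.List.foldl_congr_mem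
  intro row cx _
  rw [List.foldl_map]
  have r2 : List.range 2 = [0, 1] := by decide
  simp only [r2, List.foldl_cons, List.foldl_nil]
  rw [show (2 * cx + 0) / 2 = cx by omega, show (2 * cx + 1) / 2 = cx by omega, modify_modify]
  unfold cellPair
  simp only [Nat.add_zero]

lemma rows_getElem (grid : List (List Int)) (W : Nat) (φ : Nat → Nat) (l : List Nat) (row : List Int) (j : Nat) :
    (l.foldl (fun row r => rowFun grid W (φ r) row) row)[j]? =
      if j < W then row[j]?.map (fun b => l.foldl (fun b r => cellPair grid (φ r) j b) b) else row[j]? := by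
  induction l generalizing row with
  | nil => split <;> simp
  | cons r0 t ih =>
    simp only [List.foldl_cons]
    rw [ih, rowFun_eq, foldl_modify_getElem]
    by_cases h : j < W
    · simp only [if_pos h]
      cases row[j]? <;> simp
    · simp [h]

lemma G_row (grid : List (List Int)) (W cy : Nat) :
    (List.range 4).foldl (fun row r => rowFun grid W (4 * cy + r) row) (List.replicate W (0 : Int)) =
      (List.range W).map (fun cx => cellBits grid cy cx) := by
  apply List.ext_getElem?
  intro j
  rw [rows_getElem grid W (fun r => 4 * cy + r)]
  by_cases h : j < W
  · rw [if_pos h]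
    rw [List.getElem?_replicate, if_pos h, List.getElem?_map, List.getElem?_range h]
    simp only [Option.map_some]
    congr 1
  · rw [if_neg h]
    rw [List.getElem?_eq_none (by simpa using Nat.le_of_not_lt h),
        List.getElem?_eq_none (by simpa using Nat.le_of_not_lt h)]

lemma B_form (grid : List (List Int)) (w h : Int) :
    draw_braille_alt grid w h =
      String.ofList (PySem.Chars.join ['\n'] ((List.range h.toNat).map (fun cy =>
        (List.range w.toNat).map (fun cx => rend (cellBits grid cy cx))))) := by
  simp only [draw_braille_alt]
  have hacc0 : ((PySem.List.pyRange 0 h 1).map (fun _ => PySem.List.pyRepeat [(0 : Int)] w))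
      = List.replicate h.toNat (List.replicate w.toNat (0 : Int)) := by
    rw [pyRange01 h, PySem.List.pyRepeat_singleton, List.map_map]
    simp only [Function.comp_def]
    rw [List.map_const', List.length_range]
  rw [hacc0, pyRange01 (h * 4), List.foldl_map]
  have hstep : (fun (acc : List (List Int)) (gy : Nat) =>
        acc.modify (PySem.Int.floordiv (gy : Int) 4).toNat (fun row =>
          (PySem.List.pyRange 0 (w * 2) 1).foldl (fun row gx =>
            if PySem.List.pyGetD (PySem.List.pyGetD grid (gy : Int) []) gx 0 ≠ 0 then
              row.modify (PySem.Int.floordiv gx 2).toNat (fun b =>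
                PySem.Int.bor b ((1 : Int) <<< (DOT_MAP (PySem.Int.mod gx 2) (PySem.Int.mod (gy : Int) 4) - 1)))
            else row) row))
      = (fun acc gy => acc.modify (gy / 4) (rowFun grid w.toNat gy)) := by
    funext acc gy
    rw [div4_cast, mod4_cast]
    congr 1
    funext row
    rw [pyRange01 (w * 2), List.foldl_map]
    unfold rowFun
    rw [show (w * 2).toNat = w.toNat * 2 by omega]
    apply PySem.List.foldl_congr_mem
    intro row gx _
    rw [div2_cast, mod2_cast, ite_modify]
    rfl
  rw [hstep]
  rw [show (h * 4).toNat = h.toNat * 4 by omega, range_mul_flatMap h.toNat 4, List.foldl_flatMap]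
  have hstep2 : (fun (acc : List (List Int)) (cy : Nat) =>
        ((List.range 4).map (fun d => 4 * cy + d)).foldl (fun acc gy => acc.modify (gy / 4) (rowFun grid w.toNat gy)) acc)
      = (fun acc cy => acc.modify cy (fun row =>
          (List.range 4).foldl (fun row r => rowFun grid w.toNat (4 * cy + r) row) row)) := by
    funext acc cy
    rw [List.foldl_map]
    have hcg : List.foldl (fun (x : List (List Int)) (y : Nat) =>
          x.modify ((4 * cy + y) / 4) (rowFun grid w.toNat (4 * cy + y))) acc (List.range 4)
        = List.foldl (fun x y => x.modify cy (rowFun grid w.toNat (4 * cy + y))) acc (List.range 4) := by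
      apply PySem.List.foldl_congr_mem
      intro a r hr
      rw [show (4 * cy + r) / 4 = cy from by have := List.mem_range.mp hr; omega]
    rw [hcg, foldl_modify_const]
  rw [hstep2, foldl_modify_range_replicate]
  congr 1
  congr 1
  rw [List.map_map]
  apply List.map_congr_left
  intro cy _
  rw [Function.comp_apply, G_row, List.map_map]
  apply List.map_congr_left
  intro cx _
  rfl

-- ===== VERDICT (by name: the statement is the Claim_ definition above) =====
theorem draw_braille_spec : Claim_equal_draw_braille := by
  intro grid w h _ _
  unfold Spec_draw_braille
  rw [A_form, B_form]
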